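-- pv_equiv track=rewrite | github.com/matildatoren/exjobb | src/migrations/database_reorganization.py | merge_milestones_jsonb
-- ===== SOURCE A (Python) =====
-- def is_empty_value(val) -> bool:
--     """Returns True if a value should be considered empty/absent."""
--     if val is None:
--         return True
--     if val == "" or val == [] or val == {}:
--         return True
--     return False
--
-- def merge_milestones_jsonb(rows: list, field: str) -> dict:
--     """
--     Collects all unique milestones from a { milestones: [...] } JSONB field.
--     Preserves order of first appearance.
--     """
--     seen   = set()
--     result = []
--     for row in rows:
--         jdata = row.get(field)
--         if is_empty_value(jdata) or "milestones" not in jdata: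
--             continue
--         for milestone in jdata["milestones"]:
--             if milestone and milestone not in seen:
--                 seen.add(milestone)
--                 result.append(milestone)
--     return {"milestones": result} if result else None
-- ===== SOURCE B (Python) =====
-- def is_empty_value(val) -> bool:
--     """Returns True if a value should be considered empty/absent."""
--     if val is None:
--         return True
--     if val == "" or val == [] or val == {}:
--         return True
--     return False
--
-- def merge_milestones_jsonb(rows: list, field: str) -> dict:
--     """Flatten all truthy milestones with one nested comprehension, then
--     deduplicate with a prefix-membership scan (no set/dict): an element is
--     kept iff it does not already occur earlier in the candidate list."""
--     candidates = [m
--                   for row in rows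
--                   for jdata in (row.get(field),)
--                   if not (is_empty_value(jdata) or "milestones" not in jdata)
--                   for m in jdata["milestones"]
--                   if m]
--     result = [m for i, m in enumerate(candidates) if m not in candidates[:i]]
--     return {"milestones": result} if result else None
-- ===== Notes on version B (the rewrite author's own statement) =====
-- stated objective: alternative
-- what changed: A interleaves collection and deduplication in one loop maintaining a seen-set and a result list; B uses no auxiliary set/dict at all: it flattens all truthy milestones with a nested comprehension and deduplicates by a prefix-membership scan (keep candidates[i] iff it is not in candidates[:i]).
import Mathlib
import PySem

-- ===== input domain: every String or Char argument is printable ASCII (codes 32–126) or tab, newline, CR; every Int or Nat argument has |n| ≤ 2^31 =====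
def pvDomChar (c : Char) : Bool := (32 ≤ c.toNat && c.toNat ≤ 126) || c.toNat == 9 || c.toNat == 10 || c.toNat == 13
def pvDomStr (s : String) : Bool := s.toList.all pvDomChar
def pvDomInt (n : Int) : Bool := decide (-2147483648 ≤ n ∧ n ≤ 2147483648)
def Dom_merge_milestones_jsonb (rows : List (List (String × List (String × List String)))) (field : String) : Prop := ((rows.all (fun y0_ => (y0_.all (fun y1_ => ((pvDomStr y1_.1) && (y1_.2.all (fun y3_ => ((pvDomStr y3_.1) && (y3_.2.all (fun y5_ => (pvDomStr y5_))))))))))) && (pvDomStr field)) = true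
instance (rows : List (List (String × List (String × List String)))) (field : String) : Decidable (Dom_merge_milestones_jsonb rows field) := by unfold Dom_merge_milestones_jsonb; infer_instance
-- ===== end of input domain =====

-- B flattens the truthy milestones with one nested comprehension and deduplicates by a
-- prefix-membership scan (keep candidates[i] iff it is not in candidates[:i]) instead of
-- A's interleaved seen-set loop; no auxiliary set/dict (objective: alternative).

-- ===== PORT A =====
-- is_empty_value(val): val here is Optional[dict]; only None and {} can make it True
def is_empty_value_A (val : Option (List (String × List String))) : Bool :=
  match val with
  | none => true
  | some d => decide (d = [])

-- A: one loop over rows carrying (seen, result); inner loop over jdata["milestones"].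
-- The Python pair «"milestones" not in jdata: continue» + «jdata["milestones"]» is
-- transcribed as the single exact lookup (Dict.mk jd).get? "milestones" (none = not in).
def merge_milestones_jsonb (rows : List (List (String × List (String × List String)))) (field : String) : Option (List (String × List String)) :=
  let st := rows.foldl (fun (st : PySem.Set String × List String) row =>
      let jdata := (PySem.Dict.mk row).get? field
      if is_empty_value_A jdata then st
      else
        match jdata with
        | none => st
        | some jd =>
          match (PySem.Dict.mk jd).get? "milestones" with
          | none => st
          | some ms =>
            ms.foldl (fun (st : PySem.Set String × List String) m =>
              if m ≠ "" ∧ PySem.Set.contains st.1 m = false then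
                (PySem.Set.add st.1 m, st.2 ++ [m])
              else st) st)
    (PySem.Set.empty, [])
  if st.2 = [] then none else some [("milestones", st.2)]

-- ===== PORT B =====
-- the truthy milestones contributed by one row (the per-row part of Source B's comprehension)
def rowMilestones (field : String) (row : List (String × List (String × List String))) : List String :=
  match (PySem.Dict.mk row).get? field with
  | none => []
  | some jd =>
    if decide (jd = []) then []
    else
      match (PySem.Dict.mk jd).get? "milestones" with
      | none => []
      | some ms => ms.filter (fun m => m ≠ "")

def merge_milestones_jsonb_alt (rows : List (List (String × List (String × List String)))) (field : String) : Option (List (String × List String)) :=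
  let candidates := rows.flatMap (rowMilestones field)
  -- [m for i, m in enumerate(candidates) if m not in candidates[:i]]
  let result := (PySem.List.enumerate candidates 0).filterMap
      (fun p => if p.2 ∈ PySem.List.slice candidates none (some p.1) then none else some p.2)
  if result = [] then none else some [("milestones", result)]

-- ===== PRECONDITION & SPEC =====
def Spec_merge_milestones_jsonb (rows : List (List (String × List (String × List String)))) (field : String) (out : Option (List (String × List String))) : Prop := out = merge_milestones_jsonb_alt rows field
instance (rows : List (List (String × List (String × List String)))) (field : String) (out : Option (List (String × List String))) : Decidable (Spec_merge_milestones_jsonb rows field out) := by unfold Spec_merge_milestones_jsonb; infer_instance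

-- ===== CLAIM (what is proved, stated in full; the proofs are below) =====
def Claim_equal_merge_milestones_jsonb : Prop := ∀ (rows : List (List (String × List (String × List String)))) (field : String), Dom_merge_milestones_jsonb rows field → Spec_merge_milestones_jsonb rows field (merge_milestones_jsonb rows field)

-- ===== LEMMAS AND PROOFS =====

-- the diagonal action of A's inner step: add the milestone if truthy
def addIf (s : PySem.Set String) (m : String) : PySem.Set String :=
  if m ≠ "" then PySem.Set.add s m else s

theorem stepA_diag (s : PySem.Set String) (m : String) :
    (if m ≠ "" ∧ PySem.Set.contains s m = false then
        (PySem.Set.add s m, s ++ [m])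
      else ((s, s) : PySem.Set String × List String))
      = (addIf s m, addIf s m) := by
  by_cases hm : m = ""
  · rw [if_neg (by simp [hm])]
    unfold addIf
    rw [if_neg (by simp [hm])]
  · by_cases hc : PySem.Set.contains s m = false
    · have hadd : PySem.Set.add s m = s ++ [m] := by
        unfold PySem.Set.add; rw [hc]; rfl
      rw [if_pos ⟨hm, hc⟩]
      unfold addIf
      rw [if_pos hm, hadd]
    · have hct : PySem.Set.contains s m = true := by
        cases h : PySem.Set.contains s m
        · exact absurd h hc
        · rfl
      have hadd : PySem.Set.add s m = s := by
        unfold PySem.Set.add; rw [hct]; rfl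
      rw [if_neg (fun h => by rw [hct] at h; exact absurd h.2 (by decide))]
      unfold addIf
      rw [if_pos hm, hadd]

-- A's inner milestone loop, started on a diagonal state (s, s), stays diagonal
theorem inner_diag (ms : List String) (s : PySem.Set String) :
    ms.foldl (fun (st : PySem.Set String × List String) m =>
        if m ≠ "" ∧ PySem.Set.contains st.1 m = false then
          (PySem.Set.add st.1 m, st.2 ++ [m])
        else st) (s, s)
      = (ms.foldl addIf s, ms.foldl addIf s) := by
  induction ms generalizing s with
  | nil => rfl
  | cons m rest ih =>
    simp only [List.foldl_cons]
    rw [stepA_diag s m]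
    exact ih (addIf s m)

-- folding addIf is folding Set.add over the truthy milestones
theorem foldl_addIf (ms : List String) (s : PySem.Set String) :
    ms.foldl addIf s = (ms.filter (fun m => m ≠ "")).foldl PySem.Set.add s := by
  induction ms generalizing s with
  | nil => rfl
  | cons m rest ih =>
    by_cases hm : m = ""
    · simp [hm, addIf, ih]
    · simp [hm, addIf, ih]

-- A's per-row step on a diagonal state contributes exactly rowMilestones
theorem row_diag (field : String) (row : List (String × List (String × List String))) (s : PySem.Set String) :
    (let jdata := (PySem.Dict.mk row).get? field
      if is_empty_value_A jdata then ((s, s) : PySem.Set String × List String)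
      else
        match jdata with
        | none => (s, s)
        | some jd =>
          match (PySem.Dict.mk jd).get? "milestones" with
          | none => (s, s)
          | some ms =>
            ms.foldl (fun (st : PySem.Set String × List String) m =>
              if m ≠ "" ∧ PySem.Set.contains st.1 m = false then
                (PySem.Set.add st.1 m, st.2 ++ [m])
              else st) (s, s))
      = ((rowMilestones field row).foldl PySem.Set.add s,
         (rowMilestones field row).foldl PySem.Set.add s) := by
  simp only [rowMilestones]
  cases hj : (PySem.Dict.mk row).get? field with
  | none => simp [is_empty_value_A]
  | some jd =>
    by_cases he : jd = []
    · simp [is_empty_value_A, he]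
    · simp only [is_empty_value_A, he, decide_false, Bool.false_eq_true, if_false]
      cases hms : (PySem.Dict.mk jd).get? "milestones" with
      | none => simp
      | some ms => simp only [inner_diag, foldl_addIf]

-- A's outer loop on a diagonal state equals Set.add folded over the flattened candidates
theorem outer_diag (field : String) (rows : List (List (String × List (String × List String)))) (s : PySem.Set String) :
    rows.foldl (fun (st : PySem.Set String × List String) row =>
      let jdata := (PySem.Dict.mk row).get? field
      if is_empty_value_A jdata then st
      else
        match jdata with
        | none => st
        | some jd =>
          match (PySem.Dict.mk jd).get? "milestones" with
          | none => st
          | some ms =>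
            ms.foldl (fun (st : PySem.Set String × List String) m =>
              if m ≠ "" ∧ PySem.Set.contains st.1 m = false then
                (PySem.Set.add st.1 m, st.2 ++ [m])
              else st) st) (s, s)
      = ((rows.flatMap (rowMilestones field)).foldl PySem.Set.add s,
         (rows.flatMap (rowMilestones field)).foldl PySem.Set.add s) := by
  induction rows generalizing s with
  | nil => rfl
  | cons row rest ih =>
    simp only [List.foldl_cons, List.flatMap_cons, List.foldl_append]
    rw [row_diag field row s]
    exact ih _

-- B's prefix-membership dedup, generalized over an already-scanned prefix:
-- the kept elements are the first occurrences of l that do not occur in pre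
theorem prefix_dedup_gen (pre l : List String) :
    (PySem.List.enumerate l (pre.length : Int)).filterMap
        (fun p => if p.2 ∈ PySem.List.slice (pre ++ l) none (some p.1) then none else some p.2)
      = (PySem.Set.ofList l).filter (fun y => decide (y ∉ pre)) := by
  induction l generalizing pre with
  | nil => simp [PySem.List.enumerate, PySem.Set.ofList_nil]
  | cons m rest ih =>
    rw [PySem.List.enumerate_cons, List.filterMap_cons]
    have hsl : PySem.List.slice (pre ++ m :: rest) none (some (pre.length : Int)) = pre := by
      rw [PySem.List.slice_to_natCast]
      simp
    have hrec := ih (pre ++ [m])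
    have hlen : ((pre ++ [m]).length : Int) = (pre.length : Int) + 1 := by
      simp
    rw [hlen, (by simp : (pre ++ [m]) ++ rest = pre ++ m :: rest)] at hrec
    rw [hsl, hrec, PySem.Set.ofList_cons, List.filter_cons]
    have hmain : List.filter (fun y => decide (y ∉ pre ++ [m])) (PySem.Set.ofList rest)
        = List.filter (fun y => decide (y ∉ pre)) (PySem.Set.discard (PySem.Set.ofList rest) m) := by
      unfold PySem.Set.discard
      rw [List.filter_filter]
      apply List.filter_congr
      intro y _
      by_cases hy : y ∈ pre <;> by_cases hym : y = m <;> simp [hy, hym]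
    by_cases hm : m ∈ pre
    · rw [if_pos hm, if_neg (by simp [hm])]
      exact hmain
    · rw [if_neg hm, if_pos (by simp [hm])]
      show m :: _ = m :: _
      exact congrArg _ hmain

-- the nil-prefix instance of prefix_dedup_gen, in the exact form B's port uses
theorem prefix_dedup_nil (l : List String) :
    (PySem.List.enumerate l 0).filterMap
        (fun p => if p.2 ∈ PySem.List.slice l none (some p.1) then none else some p.2)
      = PySem.Set.ofList l := by
  have h := prefix_dedup_gen [] l
  simp only [List.length_nil, Nat.cast_zero, List.nil_append] at h
  simp only [List.not_mem_nil, not_false_iff, decide_true, List.filter_true] at h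
  convert h using 2

-- ===== VERDICT (by name: the statement is the Claim_ definition above) =====
theorem merge_milestones_jsonb_spec : Claim_equal_merge_milestones_jsonb := by
  intro rows field _
  unfold Spec_merge_milestones_jsonb merge_milestones_jsonb merge_milestones_jsonb_alt
  have h := outer_diag field rows []
  simp only [PySem.Set.empty] at h ⊢
  rw [h]
  rw [← PySem.Set.ofList_eq_foldl, prefix_dedup_nil]
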